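-- pv_equiv track=rewrite | github.com/manwar/perlweeklychallenge-club | challenge-339/lubos-kolouch/python/ch-2.py | peak_point
-- ===== SOURCE A (Python) =====
-- GainList = list[int]
--
-- def peak_point(gain: GainList) -> int:
--     """Return the maximum altitude reached given incremental gains."""
--     altitude = 0
--     peak = 0
--     for delta in gain:
--         altitude += delta
--         if altitude > peak:
--             peak = altitude
--     return peak
-- ===== SOURCE B (Python) =====
-- def peak_point(gain):
--     """Return the maximum altitude reached given incremental gains."""
--     # Backward pass: peak is the best (floored at 0) altitude gain achievable
--     # by the remaining suffix; fold right-to-left instead of tracking a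
--     # running altitude and running maximum.
--     peak = 0
--     for delta in reversed(gain):
--         peak = max(0, delta + peak)
--     return peak
-- ===== Notes on version B (the rewrite author's own statement) =====
-- stated objective: alternative
-- what changed: Traverses the list right-to-left with a single accumulator peak = max(0, delta + peak) (a suffix-based right fold), instead of A's left-to-right pass maintaining both a running altitude and a running maximum; no prefix sums are ever formed.
import Mathlib
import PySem

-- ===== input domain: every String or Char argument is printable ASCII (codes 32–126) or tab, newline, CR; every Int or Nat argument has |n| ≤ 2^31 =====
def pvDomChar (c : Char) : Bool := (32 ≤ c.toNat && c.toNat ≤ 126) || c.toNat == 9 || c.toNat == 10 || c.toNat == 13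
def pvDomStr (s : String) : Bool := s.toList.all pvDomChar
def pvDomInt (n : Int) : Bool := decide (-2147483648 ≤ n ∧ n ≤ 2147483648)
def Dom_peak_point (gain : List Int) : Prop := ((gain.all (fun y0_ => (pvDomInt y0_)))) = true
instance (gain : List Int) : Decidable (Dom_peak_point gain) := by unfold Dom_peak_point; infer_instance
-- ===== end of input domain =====

-- B traverses right-to-left with one accumulator (peak = max 0 (delta + peak), a right fold over suffixes) instead of A's forward pass with running altitude and running maximum; same result, alternative algorithm.


-- ===== PORT A =====
-- literal port of A: forward fold carrying (altitude, peak)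
def peak_point (gain : List Int) : Int :=
  (gain.foldl (fun (s : Int × Int) delta =>
    let altitude := s.1 + delta
    (altitude, if altitude > s.2 then altitude else s.2)) (0, 0)).2

-- ===== PORT B =====
-- port of B: right-to-left pass (for delta in reversed(gain)) with one accumulator
def peak_point_alt (gain : List Int) : Int :=
  gain.reverse.foldl (fun peak delta => max 0 (delta + peak)) 0

-- ===== PRECONDITION & SPEC =====
def Spec_peak_point (gain : List Int) (out : Int) : Prop := out = peak_point_alt gain
instance (gain : List Int) (out : Int) : Decidable (Spec_peak_point gain out) := by unfold Spec_peak_point; infer_instance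

-- ===== CLAIM (what is proved, stated in full; the proofs are below) =====
def Claim_equal_peak_point : Prop := ∀ (gain : List Int), Dom_peak_point gain → Spec_peak_point gain (peak_point gain)

-- ===== LEMMAS AND PROOFS =====

-- B's reverse-foldl is the right fold max 0 (d + ·)
theorem pv_alt_eq_foldr (gain : List Int) :
    peak_point_alt gain = gain.foldr (fun d p => max 0 (d + p)) 0 := by
  unfold peak_point_alt
  rw [← List.foldr_reverse, List.reverse_reverse]

-- the right fold is nonnegative
theorem pv_foldr_nonneg (gain : List Int) :
    0 ≤ gain.foldr (fun d p => max 0 (d + p)) 0 := by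
  cases gain with
  | nil => simp
  | cons d g => simp [List.foldr]

-- invariant: A's fold from (a, p), with a ≤ p, equals max p (a + B's right fold)
theorem pv_fold_inv (gain : List Int) : ∀ (a p : Int), a ≤ p →
    (gain.foldl (fun (s : Int × Int) delta =>
      let altitude := s.1 + delta
      (altitude, if altitude > s.2 then altitude else s.2)) (a, p)).2
    = max p (a + gain.foldr (fun d p => max 0 (d + p)) 0) := by
  induction gain with
  | nil => intro a p h; simp; omega
  | cons d g ih =>
      intro a p h
      simp only [List.foldl, List.foldr]
      rw [ih (a + d) (if a + d > p then a + d else p) (by omega)]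
      have hn := pv_foldr_nonneg g
      omega

-- ===== VERDICT (by name: the statement is the Claim_ definition above) =====
theorem peak_point_spec : Claim_equal_peak_point := by
  intro gain _
  unfold Spec_peak_point peak_point
  rw [pv_alt_eq_foldr, pv_fold_inv gain 0 0 le_rfl]
  have := pv_foldr_nonneg gain
  omega
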